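-- pv_equiv track=rewrite | github.com/ac-Spark/arcreel360 | lib/episode_splitter.py | find_char_offset
-- ===== SOURCE A (Python) =====
-- def find_char_offset(text: str, target_count: int) -> int:
--     """將有效字數轉換為原文字元偏移位置（0-based）。
--
--     遍歷原文，跳過空行中的字元，當累計有效字數達到 target_count 時，
--     返回對應的原文字元偏移。target_count 超過總有效字數時，返回文字末尾偏移。
--     """
--     counted = 0
--     lines = text.split("\n")
--     pos = 0  # 原文中的字元位置
--
--     for line_idx, line in enumerate(lines):
--         stripped = line.strip()
--         if not stripped:
--             # 空行：跳過整行（含換行符）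
--             pos += len(line)
--             if line_idx < len(lines) - 1:
--                 pos += 1  # 換行符
--             continue
--
--         # 非空行：逐字元計數
--         for char in line:
--             if not char.strip():
--                 # 行首/行尾空白不計入有效字數，但推進偏移
--                 pos += 1
--                 continue
--             counted += 1
--             if counted >= target_count:
--                 return pos
--             pos += 1
--
--         if line_idx < len(lines) - 1:
--             pos += 1  # 換行符
--
--     return pos
-- ===== SOURCE B (Python) =====
-- def find_char_offset(text: str, target_count: int) -> int:
--     """Single flat scan: count non-whitespace characters; return the offset of the
--     character at which the running count reaches target_count, else len(text)."""
--     counted = 0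
--     for i, char in enumerate(text):
--         if char.strip():
--             counted += 1
--             if counted >= target_count:
--                 return i
--     return len(text)
-- ===== Notes on version B (the rewrite author's own statement) =====
-- stated objective: simpler
-- what changed: Replaces the split-into-lines pass with nested loops and manual position bookkeeping by one flat enumerate scan over the text, since whitespace-only lines and newlines contribute no valid characters anyway.
import Mathlib
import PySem

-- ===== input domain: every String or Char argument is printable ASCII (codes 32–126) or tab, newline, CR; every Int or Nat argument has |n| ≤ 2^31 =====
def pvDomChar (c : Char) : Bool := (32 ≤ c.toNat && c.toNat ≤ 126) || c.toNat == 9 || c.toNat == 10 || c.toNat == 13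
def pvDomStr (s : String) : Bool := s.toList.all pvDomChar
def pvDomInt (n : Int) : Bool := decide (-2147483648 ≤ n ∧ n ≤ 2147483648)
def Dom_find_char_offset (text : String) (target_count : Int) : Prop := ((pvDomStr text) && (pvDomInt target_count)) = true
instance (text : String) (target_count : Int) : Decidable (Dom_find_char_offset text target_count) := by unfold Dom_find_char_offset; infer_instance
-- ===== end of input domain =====

-- B drops A's line splitting: one flat scan over the characters, counting non-whitespace ones.

-- ===== PORT A =====
-- inner 'for char in line' loop: .inl r = early return r, .inr (counted, pos) = loop finished
def pvALine (cs : List Char) (counted pos target : Int) : Sum Int (Int × Int) :=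
  match cs with
  | [] => .inr (counted, pos)
  | c :: rest =>
    if PySem.Chars.strip [c] = [] then
      pvALine rest counted (pos + 1) target
    else if counted + 1 ≥ target then .inl pos
    else pvALine rest (counted + 1) (pos + 1) target

-- outer 'for line_idx, line in enumerate(lines)' loop; 'line_idx < len(lines)-1' ↔ rest ≠ []
def pvALines (lines : List (List Char)) (counted pos target : Int) : Int :=
  match lines with
  | [] => pos
  | line :: rest =>
    if PySem.Chars.strip line = [] then
      pvALines rest counted (pos + line.length + (if rest ≠ [] then 1 else 0)) target
    else
      match pvALine line counted pos target with
      | .inl r => r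
      | .inr (counted', pos') =>
          pvALines rest counted' (pos' + (if rest ≠ [] then 1 else 0)) target

def find_char_offset (text : String) (target_count : Int) : Int :=
  pvALines (PySem.Chars.splitOn text.toList ['\n']) 0 0 target_count

-- ===== PORT B =====
-- flat 'for i, char in enumerate(text)' loop; at the end i = len(text)
def pvBGo (cs : List Char) (i counted target : Int) : Int :=
  match cs with
  | [] => i
  | c :: rest =>
    if PySem.Chars.strip [c] = [] then pvBGo rest (i + 1) counted target
    else if counted + 1 ≥ target then i
    else pvBGo rest (i + 1) (counted + 1) target

def find_char_offset_alt (text : String) (target_count : Int) : Int :=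
  pvBGo text.toList 0 0 target_count

-- ===== PRECONDITION & SPEC =====
def Spec_find_char_offset (text : String) (target_count : Int) (out : Int) : Prop := out = find_char_offset_alt text target_count
instance (text : String) (target_count : Int) (out : Int) : Decidable (Spec_find_char_offset text target_count out) := by unfold Spec_find_char_offset; infer_instance

-- ===== CLAIM (what is proved, stated in full; the proofs are below) =====
def Claim_equal_find_char_offset : Prop := ∀ (text : String) (target_count : Int), Dom_find_char_offset text target_count → Spec_find_char_offset text target_count (find_char_offset text target_count)

-- ===== LEMMAS AND PROOFS =====

-- reference split: straightforward recursive split on '\n' with an accumulated current piece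
def pvMsplit (pre : List Char) (s : List Char) : List (List Char) :=
  match s with
  | [] => [pre]
  | c :: rest => if c = '\n' then pre :: pvMsplit [] rest else pvMsplit (pre ++ [c]) rest

lemma pvMsplit_ne_nil (pre s : List Char) : pvMsplit pre s ≠ [] := by
  induction s generalizing pre with
  | nil => simp [pvMsplit]
  | cons c rest ih =>
    by_cases h : c = '\n'
    · simp [pvMsplit, h]
    · simp only [pvMsplit, h, if_false]
      exact ih _

lemma pvSplitOn_go_eq (fuel : Nat) (l : List Char) (h : l.length < fuel)
    (cur : List Char) (acc : List (List Char)) :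
    PySem.Chars.splitOn.go ['\n'] fuel l cur acc = acc.reverse ++ pvMsplit cur.reverse l := by
  induction fuel generalizing l cur acc with
  | zero => omega
  | succ fuel ih =>
    cases l with
    | nil => simp [PySem.Chars.splitOn.go, pvMsplit]
    | cons c rest =>
      by_cases hc : c = '\n'
      · subst hc
        have hpre : List.isPrefixOf ['\n'] ('\n' :: rest) = true := by
          simp [List.isPrefixOf]
        rw [PySem.Chars.splitOn.go]
        simp only [hpre, if_true, List.length_nil, List.length_cons, List.drop_succ_cons,
          List.drop_zero]
        rw [ih rest (by simpa using Nat.lt_of_succ_lt_succ h) [] (cur.reverse :: acc)]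
        simp [pvMsplit]
      · have hpre : List.isPrefixOf ['\n'] (c :: rest) = false := by
          simp only [List.isPrefixOf, Bool.and_true,
            beq_eq_false_iff_ne, ne_eq]
          exact fun h => hc h.symm
        rw [PySem.Chars.splitOn.go]
        simp only [hpre, Bool.false_eq_true, if_false]
        rw [ih rest (by simpa using Nat.lt_of_succ_lt_succ h) (c :: cur) acc]
        simp [pvMsplit, hc]

lemma pvSplitOn_eq_msplit (s : List Char) :
    PySem.Chars.splitOn s ['\n'] = pvMsplit [] s := by
  unfold PySem.Chars.splitOn
  rw [pvSplitOn_go_eq (s.length + 1) s (by omega) [] []]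
  simp

lemma pvJoin_msplit (pre s : List Char) :
    PySem.Chars.join ['\n'] (pvMsplit pre s) = pre ++ s := by
  induction s generalizing pre with
  | nil => simp [pvMsplit, PySem.Chars.join_singleton]
  | cons c rest ih =>
    by_cases hc : c = '\n'
    · subst hc
      obtain ⟨m, ms, hm⟩ := List.exists_cons_of_ne_nil (pvMsplit_ne_nil [] rest)
      simp only [pvMsplit, if_true]
      rw [hm, PySem.Chars.join_cons_cons, ← hm, ih]
      simp
    · simp only [pvMsplit, hc, if_false]
      rw [ih]
      simp

-- a stripped-empty list consists of whitespace only
lemma pvStrip_nil_all_ws (cs : List Char) (h : PySem.Chars.strip cs = []) :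
    ∀ c ∈ cs, PySem.Chars.isspace c = true := by
  have hl : ∀ c ∈ PySem.Chars.lstrip cs, PySem.Chars.isspace c = true := by
    intro c hc
    have : List.dropWhile PySem.Chars.isspace (PySem.Chars.lstrip cs).reverse = [] := by
      have := h
      unfold PySem.Chars.strip PySem.Chars.rstrip at this
      simpa [List.reverse_eq_nil_iff] using this
    rw [List.dropWhile_eq_nil_iff] at this
    exact this c (by simpa using hc)
  intro c hc
  unfold PySem.Chars.lstrip at hl
  rcases List.mem_append.1 (by simpa [List.takeWhile_append_dropWhile] using hc :
      c ∈ List.takeWhile PySem.Chars.isspace cs ++ List.dropWhile PySem.Chars.isspace cs) with h1 | h2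
  · exact List.mem_takeWhile_imp h1
  · exact hl c h2

lemma pvStrip_singleton (c : Char) :
    PySem.Chars.strip [c] = (if PySem.Chars.isspace c then [] else [c]) := by
  by_cases h : PySem.Chars.isspace c <;>
    simp [PySem.Chars.strip, PySem.Chars.lstrip, PySem.Chars.rstrip, h]

lemma pvStrip_singleton_nil_iff (c : Char) :
    PySem.Chars.strip [c] = [] ↔ PySem.Chars.isspace c = true := by
  rw [pvStrip_singleton]; by_cases h : PySem.Chars.isspace c <;> simp [h]

-- B skips a run of whitespace characters, advancing the index by its length
lemma pvBGo_ws_skip (cs rest : List Char) (hws : ∀ c ∈ cs, PySem.Chars.isspace c = true)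
    (i counted target : Int) :
    pvBGo (cs ++ rest) i counted target = pvBGo rest (i + cs.length) counted target := by
  induction cs generalizing i with
  | nil => simp
  | cons c cs' ih =>
    have hc : PySem.Chars.strip [c] = [] :=
      (pvStrip_singleton_nil_iff c).2 (hws c (by simp))
    simp only [List.cons_append, pvBGo, hc, if_true]
    rw [ih (fun x hx => hws x (by simp [hx])) (i + 1)]
    congr 1
    push_cast [List.length_cons]
    ring

-- B over a line followed by anything matches A's inner loop on that line
lemma pvBGo_line (cs rest : List Char) (counted pos target : Int) :
    pvBGo (cs ++ rest) pos counted target =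
      (match pvALine cs counted pos target with
       | .inl r => r
       | .inr (c', p') => pvBGo rest p' c' target) := by
  induction cs generalizing counted pos with
  | nil => simp [pvALine]
  | cons c cs' ih =>
    by_cases hc : PySem.Chars.strip [c] = []
    · simp only [List.cons_append, pvBGo, pvALine, hc, if_true]
      exact ih counted (pos + 1)
    · by_cases ht : counted + 1 ≥ target
      · simp [pvBGo, pvALine, hc, ht]
      · simp only [List.cons_append, pvBGo, pvALine, hc, ht, if_false]
        exact ih (counted + 1) (pos + 1)

-- main invariant: A's line-by-line loop equals B's flat scan over the joined text
lemma pvALines_eq_pvBGo (L : List (List Char)) (counted pos target : Int) :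
    pvALines L counted pos target = pvBGo (PySem.Chars.join ['\n'] L) pos counted target := by
  induction L generalizing counted pos with
  | nil => simp [pvALines, PySem.Chars.join_nil, pvBGo]
  | cons line rest ih =>
    have hnl : PySem.Chars.strip ['\n'] = [] :=
      (pvStrip_singleton_nil_iff '\n').2 (by decide)
    by_cases hs : PySem.Chars.strip line = []
    · have hws := pvStrip_nil_all_ws line hs
      cases rest with
      | nil =>
        rw [PySem.Chars.join_singleton]
        have hskip := pvBGo_ws_skip line [] hws pos counted target
        simp only [List.append_nil] at hskip
        rw [hskip]
        simp [pvALines, pvBGo, hs]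
      | cons r rs =>
        rw [PySem.Chars.join_cons_cons, List.append_assoc, List.singleton_append,
          pvBGo_ws_skip line _ hws, pvBGo, hnl, if_pos rfl,
          ← ih counted (pos + (line.length : Int) + 1)]
        conv_lhs => rw [pvALines]
        simp only [hs, ne_eq, reduceCtorEq, not_false_eq_true, if_true]
    · cases rest with
      | nil =>
        rw [PySem.Chars.join_singleton]
        have hb := pvBGo_line line [] counted pos target
        simp only [List.append_nil] at hb
        rw [hb]
        conv_lhs => rw [pvALines]
        simp only [if_neg hs, ne_eq, not_true_eq_false, if_false]
        cases h : pvALine line counted pos target with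
        | inl r => simp
        | inr p => simp [pvALines, pvBGo]
      | cons r rs =>
        rw [PySem.Chars.join_cons_cons, List.append_assoc, List.singleton_append,
          pvBGo_line]
        conv_lhs => rw [pvALines]
        simp only [if_neg hs, ne_eq, reduceCtorEq, not_false_eq_true, if_true]
        cases h : pvALine line counted pos target with
        | inl rr => simp
        | inr p =>
          simp only
          rw [pvBGo, hnl, if_pos rfl]
          exact ih p.1 (p.2 + 1)

-- ===== VERDICT (by name: the statement is the Claim_ definition above) =====
theorem find_char_offset_spec : Claim_equal_find_char_offset := by
  intro text target_count _
  unfold Spec_find_char_offset find_char_offset find_char_offset_alt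
  rw [pvSplitOn_eq_msplit, pvALines_eq_pvBGo, pvJoin_msplit]
  simp
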